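-- pv_equiv track=rewrite | github.com/spcl/ncc | inst2vec/inst2vec_vocabulary.py | add_to_vocabulary
-- ===== SOURCE A (Python) =====
-- import collections
--
-- def add_to_vocabulary(cumul_dic, stmt_list):
--     """
--
--     :param cumul_dic:
--     :param stmt_list:
--     :return:
--     """
--     count_stmts = collections.Counter(stmt_list)
--
--     for s in count_stmts.keys():
--         if s in cumul_dic.keys():
--             cumul_dic[s] += count_stmts[s]
--         else:
--             cumul_dic[s] = count_stmts[s]
--
--     return cumul_dic
-- ===== SOURCE B (Python) =====
-- def add_to_vocabulary(cumul_dic, stmt_list):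
--     """Two phases: bump every existing key by its count in stmt_list, then append
--     each new statement (at its first occurrence) with its full count.
--     Mutates and returns cumul_dic, like A."""
--     for k in cumul_dic:
--         cumul_dic[k] += stmt_list.count(k)
--     for s in stmt_list:
--         if s not in cumul_dic:
--             cumul_dic[s] = stmt_list.count(s)
--     return cumul_dic
-- ===== Notes on version B (the rewrite author's own statement) =====
-- stated objective: alternative
-- what changed: Replaced A's count-then-merge (build a Counter, then loop over its unique keys with a membership branch into cumul_dic) by a two-phase decomposition with no intermediate table: first bump every existing key of cumul_dic by stmt_list.count(k), then scan stmt_list once and append each new key at its first occurrence with its full count.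
import Mathlib
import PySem

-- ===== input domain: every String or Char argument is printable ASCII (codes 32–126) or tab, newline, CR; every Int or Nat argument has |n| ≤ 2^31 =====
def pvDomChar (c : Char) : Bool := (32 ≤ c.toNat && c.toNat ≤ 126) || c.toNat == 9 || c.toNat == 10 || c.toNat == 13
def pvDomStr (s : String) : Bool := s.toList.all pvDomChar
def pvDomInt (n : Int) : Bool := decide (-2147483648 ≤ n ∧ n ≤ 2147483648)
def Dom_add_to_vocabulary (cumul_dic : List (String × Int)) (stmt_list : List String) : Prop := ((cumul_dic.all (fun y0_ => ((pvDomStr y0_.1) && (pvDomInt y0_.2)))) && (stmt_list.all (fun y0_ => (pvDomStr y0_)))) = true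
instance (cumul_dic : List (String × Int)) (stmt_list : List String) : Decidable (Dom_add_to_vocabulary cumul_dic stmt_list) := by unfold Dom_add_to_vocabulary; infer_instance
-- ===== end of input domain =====

-- B replaces A's count-then-merge (Counter, then a loop over its unique keys with a membership
-- branch) by two phases with no intermediate table: bump every existing key by stmt_list.count(k),
-- then append each new statement at its first occurrence with its full count. Both Pythons mutate
-- and return cumul_dic, so return-value equivalence covers the side effect too.

-- ===== PORT A =====
def add_to_vocabulary (cumul_dic : List (String × Int)) (stmt_list : List String) : List (String × Int) :=
  let count_stmts := PySem.Dict.counter stmt_list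
  (count_stmts.keys.foldl
    (fun d s =>
      if d.contains s then d.insert s (d.getD s 0 + count_stmts.getD s 0)
      else d.insert s (count_stmts.getD s 0))
    (PySem.Dict.ofList cumul_dic)).items

-- ===== PORT B =====
-- Phase 1: 'for k in cumul_dic: cumul_dic[k] += stmt_list.count(k)' updates each (distinct) key
-- of the dict in place, in order — exactly a map over its item list.
-- Phase 2: 'if s not in cumul_dic: cumul_dic[s] = stmt_list.count(s)' appends a fresh key — exactly
-- a conditional append to the item list.
def add_to_vocabulary_alt (cumul_dic : List (String × Int)) (stmt_list : List String) : List (String × Int) :=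
  let updated := (PySem.Dict.ofList cumul_dic).items.map
    (fun p => (p.1, p.2 + (stmt_list.count p.1 : Int)))
  stmt_list.foldl
    (fun acc s =>
      if acc.any (fun p => p.1 == s) then acc
      else acc ++ [(s, (stmt_list.count s : Int))])
    updated

-- ===== PRECONDITION & SPEC =====
def Spec_add_to_vocabulary (cumul_dic : List (String × Int)) (stmt_list : List String) (out : List (String × Int)) : Prop := out = add_to_vocabulary_alt cumul_dic stmt_list
instance (cumul_dic : List (String × Int)) (stmt_list : List String) (out : List (String × Int)) : Decidable (Spec_add_to_vocabulary cumul_dic stmt_list out) := by unfold Spec_add_to_vocabulary; infer_instance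

-- ===== CLAIM (what is proved, stated in full; the proofs are below) =====
def Claim_equal_add_to_vocabulary : Prop := ∀ (cumul_dic : List (String × Int)) (stmt_list : List String), Dom_add_to_vocabulary cumul_dic stmt_list → Spec_add_to_vocabulary cumul_dic stmt_list (add_to_vocabulary cumul_dic stmt_list)

-- ===== LEMMAS AND PROOFS =====

-- Value after A's merge fold over a Nodup key list: base value plus the count where the key occurs.
lemma getD_merge_foldl (K : List String) (c : String → Int) (d : PySem.Dict String Int)
    (k : String) (hnd : K.Nodup) :
    (K.foldl (fun e s => e.insert s (e.getD s 0 + c s)) d).getD k 0 =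
      d.getD k 0 + (if k ∈ K then c k else 0) := by
  induction K generalizing d with
  | nil => simp
  | cons s t ih =>
    simp only [List.nodup_cons] at hnd
    simp only [List.foldl_cons]
    rw [ih _ hnd.2]
    by_cases hks : k = s
    · subst hks
      have hkt : k ∉ t := hnd.1
      simp [hkt, PySem.Dict.getD_insert_self]
    · rw [PySem.Dict.getD_insert_of_ne _ _ _ hks]
      simp [List.mem_cons, hks]

-- B's second phase: conditionally appending pairs = the starting list followed by the
-- fresh distinct keys of L (first occurrences), each paired with c.
lemma foldl_append_fresh (c : String → Int) (L : List String) (acc : List (String × Int)) :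
    L.foldl
      (fun a s => if a.any (fun p => p.1 == s) then a else a ++ [(s, c s)]) acc =
    acc ++ ((PySem.Set.ofList L).filter
      (fun y => !((acc.map Prod.fst).contains y))).map (fun k => (k, c k)) := by
  induction L generalizing acc with
  | nil => simp [PySem.Set.ofList]
  | cons s t ih =>
    simp only [List.foldl_cons]
    have hany : (acc.any fun p => p.1 == s) = (acc.map Prod.fst).contains s := by
      rw [Bool.eq_iff_iff]; simp [List.any_eq_true, List.mem_map]
    rw [PySem.Set.ofList_cons, PySem.Set.discard]
    by_cases hmem : s ∈ acc.map Prod.fst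
    · have hc : (acc.map Prod.fst).contains s = true := by simpa using hmem
      rw [if_pos (by rw [hany, hc]), ih]
      congr 2
      rw [List.filter_cons_of_neg (by rw [hc]; simp), List.filter_filter]
      apply List.filter_congr
      intro y _
      by_cases hys : y = s
      · subst hys; simp only [hc]; simp
      · simp [hys]
    · have hc : (acc.map Prod.fst).contains s = false := by simpa using hmem
      rw [if_neg (by rw [hany, hc]; simp), ih]
      simp only [List.map_append, List.map_cons, List.map_nil, List.append_assoc]
      congr 1
      rw [List.filter_cons_of_pos (by rw [hc]; simp), List.map_cons, List.singleton_append]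
      congr 1
      rw [List.filter_filter]
      congr 1
      apply List.filter_congr
      intro y _
      by_cases hys : y = s
      · subst hys; simp only [hc]; simp
      · rw [Bool.eq_iff_iff]; simp [List.mem_append, hys]

-- ===== VERDICT (by name: the statement is the Claim_ definition above) =====
theorem add_to_vocabulary_spec : Claim_equal_add_to_vocabulary := by
  intro cumul_dic stmt_list _
  unfold Spec_add_to_vocabulary add_to_vocabulary add_to_vocabulary_alt
  simp only [PySem.Dict.keys_counter, PySem.Dict.getD_counter]
  set d0 := PySem.Dict.ofList cumul_dic with hd0
  -- collapse A's membership branch into a single insert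
  rw [PySem.List.foldl_congr_mem (PySem.Set.ofList stmt_list) _
        (fun (e : PySem.Dict String Int) s => e.insert s (e.getD s 0 + (stmt_list.count s : Int)))
        d0
        (by
          intro acc x _
          by_cases h : acc.contains x
          · simp [h]
          · rw [if_neg h]
            show acc.insert x ((stmt_list.count x : Int)) =
              acc.insert x (acc.getD x 0 + (stmt_list.count x : Int))
            rw [PySem.Dict.getD_of_not_contains acc 0 (by simp [h]), zero_add])]
  set A' := (PySem.Set.ofList stmt_list).foldl
      (fun (e : PySem.Dict String Int) s => e.insert s (e.getD s 0 + (stmt_list.count s : Int))) d0 with hA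
  have hnd0 : d0.keys.Nodup := PySem.Dict.nodup_keys_ofList cumul_dic
  have hndA : A'.keys.Nodup := PySem.Dict.nodup_keys_foldl_insert _ _ _ hnd0
  -- A's keys: old keys, then the fresh distinct statements
  have hkeys : A'.keys = d0.keys ++ (PySem.Set.ofList stmt_list).filter
      (fun y => !(d0.keys.contains y)) := by
    rw [hA, PySem.Dict.keys_foldl_insert, PySem.Set.update_eq_append_filter,
        PySem.Set.ofList_ofList]
    simp only [PySem.Set.contains_eq_listContains]
  -- A's value at any key
  have hval : ∀ k, A'.getD k 0 = d0.getD k 0 + (stmt_list.count k : Int) := by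
    intro k
    rw [hA, getD_merge_foldl _ _ _ _ (PySem.Set.nodup_ofList stmt_list)]
    by_cases hk : k ∈ stmt_list
    · simp [PySem.Set.mem_ofList, hk]
    · simp [PySem.Set.mem_ofList, hk, List.count_eq_zero.mpr hk]
  -- B's second phase expands to an append of the fresh keys
  rw [foldl_append_fresh]
  have hfst : ((d0.items.map (fun p => (p.1, p.2 + (stmt_list.count p.1 : Int)))).map Prod.fst)
      = d0.keys := by
    rw [List.map_map]; rfl
  rw [hfst]
  -- expand A's items over its keys
  rw [PySem.Dict.items_eq_map_keys A' hndA 0, hkeys, List.map_append]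
  congr 1
  · -- old keys: map over d0's items
    rw [PySem.Dict.items_eq_map_keys d0 hnd0 0, List.map_map]
    apply List.map_congr_left
    intro k _
    simp only [Function.comp_apply]
    rw [hval k]
  · -- fresh keys: value is exactly the count
    apply List.map_congr_left
    intro k hk
    have hnc : d0.contains k = false := by
      have : ¬ k ∈ d0.keys := by
        have := (List.mem_filter.mp hk).2
        simpa using this
      exact Bool.eq_false_iff.mpr (fun h => this ((PySem.Dict.contains_iff_mem_keys _ _).mp h))
    rw [hval k, PySem.Dict.getD_of_not_contains _ _ hnc, zero_add]
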